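-- pv_equiv track=rewrite | github.com/EMBEDDIA/eunlg-with-neural-ordering | experiments/src/data/sampling.py | get_ranges
-- ===== SOURCE A (Python) =====
-- from collections import OrderedDict
--
-- def get_ranges(artlist):
--     """
--     Get sentence index starting and ending paragraphs and articles; the last index is that of the last sentence + 1.
--     :param artlist: List[List[List]], arts[pars[sents]]
--     :return: pairs of indices of articles / pars in a single list of all sents
--     """
--
--     prev_ind = 0
--     rngs = OrderedDict()
--     for a in artlist:
--         a_st = prev_ind
--         par_inds = []
--         for p in a:
--             p_st = prev_ind
--             prev_ind += len(p)
--             par_inds += [(p_st, prev_ind)]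
--         rngs[(a_st, prev_ind)] = par_inds
--
--     return rngs
-- ===== SOURCE B (Python) =====
-- from collections import OrderedDict
--
-- def get_ranges(artlist):
--     # Flatten paragraph lengths, build a prefix-sum offset table once,
--     # then slice it per article to produce the ranges.
--     lens = [len(p) for a in artlist for p in a]
--     offs = [0]
--     for n in lens:
--         offs.append(offs[-1] + n)
--     rngs = OrderedDict()
--     i = 0
--     for a in artlist:
--         j = i + len(a)
--         rngs[(offs[i], offs[j])] = list(zip(offs[i:j], offs[i + 1:j + 1]))
--         i = j
--     return rngs
-- ===== Notes on version B (the rewrite author's own statement) =====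
-- stated objective: alternative
-- what changed: B replaces A's single pass with a running sum and accumulated per-paragraph pair list by a two-phase decomposition: flatten all paragraph lengths, build one prefix-sum offset table, then slice/zip that table per article to obtain each article's key and paragraph pairs.
import Mathlib
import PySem

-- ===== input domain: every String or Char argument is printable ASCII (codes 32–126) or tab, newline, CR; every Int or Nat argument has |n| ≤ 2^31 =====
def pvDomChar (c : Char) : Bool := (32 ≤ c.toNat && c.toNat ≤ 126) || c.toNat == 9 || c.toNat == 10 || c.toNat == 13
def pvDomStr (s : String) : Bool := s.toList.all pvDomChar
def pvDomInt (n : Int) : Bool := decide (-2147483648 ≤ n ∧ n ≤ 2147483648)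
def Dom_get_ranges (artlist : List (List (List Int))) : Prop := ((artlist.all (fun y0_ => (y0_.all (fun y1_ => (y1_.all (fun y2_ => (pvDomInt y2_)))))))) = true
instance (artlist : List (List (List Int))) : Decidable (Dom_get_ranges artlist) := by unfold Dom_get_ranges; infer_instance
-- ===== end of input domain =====

-- B computes the same article/paragraph sentence-index ranges via a prefix-sum offset
-- table that is then sliced per article, instead of A's single running-sum pass (objective: alternative).


-- ===== PORT A =====
-- literal transliteration: running index prev_ind, OrderedDict rngs, inner loop accumulating
-- par_inds; the returned dict's ((a_st, a_end), pairs) items are reassociated to (a_st, a_end, pairs)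
def get_ranges (artlist : List (List (List Int))) : List (Int × Int × List (Int × Int)) :=
  let s := artlist.foldl
    (fun (st : Int × PySem.Dict (Int × Int) (List (Int × Int))) (a : List (List Int)) =>
      let a_st := st.1
      let inner := a.foldl
        (fun (q : Int × List (Int × Int)) (p : List Int) =>
          (q.1 + (p.length : Int), q.2 ++ [(q.1, q.1 + (p.length : Int))]))
        (st.1, [])
      (inner.1, st.2.insert (a_st, inner.1) inner.2))
    (0, PySem.Dict.empty)
  s.2.items.map (fun kv => (kv.1.1, kv.1.2, kv.2))

-- ===== PORT B =====
-- literal transliteration of Source B: flat paragraph lengths, prefix-sum offset table offs,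
-- then per article slice offs[i:j] / offs[i+1:j+1] (indices are Nat since i, j are always
-- nonnegative in the Python, so the slices are drop/take; offs[-1] on nonempty offs is getLastD _ 0)
def get_ranges_alt (artlist : List (List (List Int))) : List (Int × Int × List (Int × Int)) :=
  let lens : List Int := artlist.flatMap (fun a => a.map (fun p => (p.length : Int)))
  let offs : List Int := lens.foldl (fun o n => o ++ [o.getLastD 0 + n]) [0]
  let s := artlist.foldl
    (fun (st : Nat × PySem.Dict (Int × Int) (List (Int × Int))) (a : List (List Int)) =>
      let i := st.1
      let j := i + a.length
      let pairs := List.zip ((offs.drop i).take a.length) ((offs.drop (i + 1)).take a.length)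
      (j, st.2.insert (offs.getD i 0, offs.getD j 0) pairs))
    (0, PySem.Dict.empty)
  s.2.items.map (fun kv => (kv.1.1, kv.1.2, kv.2))

-- ===== PRECONDITION & SPEC =====
def Spec_get_ranges (artlist : List (List (List Int))) (out : List (Int × Int × List (Int × Int))) : Prop := out = get_ranges_alt artlist
instance (artlist : List (List (List Int))) (out : List (Int × Int × List (Int × Int))) : Decidable (Spec_get_ranges artlist out) := by unfold Spec_get_ranges; infer_instance

-- ===== CLAIM (what is proved, stated in full; the proofs are below) =====
def Claim_equal_get_ranges : Prop := ∀ (artlist : List (List (List Int))), Dom_get_ranges artlist → Spec_get_ranges artlist (get_ranges artlist)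

-- ===== LEMMAS AND PROOFS =====

-- lengths of all paragraphs, flattened
def pvFlatLens (arts : List (List (List Int))) : List Int :=
  arts.flatMap (fun a => a.map (fun p => (p.length : Int)))

-- prefix-sum table starting at prev
def pvScan (prev : Int) : List Int → List Int
  | [] => [prev]
  | n :: ns => prev :: pvScan (prev + n) ns

-- (start,end) pairs of consecutive paragraphs with lengths ls starting at prev
def pvPairs (prev : Int) : List Int → List (Int × Int)
  | [] => []
  | n :: ns => (prev, prev + n) :: pvPairs (prev + n) ns

-- common reference fold
def pvSpecFold (prev : Int) (d : PySem.Dict (Int × Int) (List (Int × Int))) :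
    List (List (List Int)) → PySem.Dict (Int × Int) (List (Int × Int))
  | [] => d
  | a :: rest =>
      let ls := a.map (fun p => (p.length : Int))
      pvSpecFold (prev + ls.sum) (d.insert (prev, prev + ls.sum) (pvPairs prev ls)) rest

theorem pvScan_head (prev : Int) (ls : List Int) :
    pvScan prev ls = prev :: (pvScan prev ls).tail := by
  cases ls <;> simp [pvScan]

theorem pvScan_getD_zero (prev : Int) (ls : List Int) :
    (pvScan prev ls).getD 0 0 = prev := by
  cases ls <;> simp [pvScan]

theorem pvScan_drop_append (l1 : List Int) (l2 : List Int) (prev : Int) :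
    (pvScan prev (l1 ++ l2)).drop l1.length = pvScan (prev + l1.sum) l2 := by
  induction l1 generalizing prev with
  | nil => simp
  | cons n ns ih => simp [pvScan, ih, add_assoc]

theorem pvScan_getD_append (l1 : List Int) (l2 : List Int) (prev : Int) :
    (pvScan prev (l1 ++ l2)).getD l1.length 0 = prev + l1.sum := by
  induction l1 generalizing prev with
  | nil => cases l2 <;> simp [pvScan]
  | cons n ns ih =>
    simp only [List.cons_append, pvScan, List.length_cons, List.getD_cons_succ, List.sum_cons]
    rw [ih]; ring

theorem pvZip_scan (l1 : List Int) (l2 : List Int) (prev : Int) :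
    List.zip ((pvScan prev (l1 ++ l2)).take l1.length)
      (((pvScan prev (l1 ++ l2)).drop 1).take l1.length) = pvPairs prev l1 := by
  induction l1 generalizing prev with
  | nil => simp [pvPairs]
  | cons n ns ih =>
    have h := pvScan_head (prev + n) (ns ++ l2)
    calc List.zip ((pvScan prev ((n :: ns) ++ l2)).take (n :: ns).length)
          (((pvScan prev ((n :: ns) ++ l2)).drop 1).take (n :: ns).length)
        = List.zip (prev :: (pvScan (prev + n) (ns ++ l2)).take ns.length)
            ((pvScan (prev + n) (ns ++ l2)).take (ns.length + 1)) := by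
          simp [pvScan, List.take_succ_cons]
      _ = (prev, prev + n) :: List.zip ((pvScan (prev + n) (ns ++ l2)).take ns.length)
            (((pvScan (prev + n) (ns ++ l2)).drop 1).take ns.length) := by
          rw [h]; simp [List.take_succ_cons, List.zip]
      _ = pvPairs prev ((n :: ns)) := by rw [ih]; simp [pvPairs]

theorem pvSplitLast (acc : List Int) (h : acc ≠ []) :
    acc = acc.dropLast ++ [acc.getLastD 0] := by
  conv_lhs => rw [← List.dropLast_concat_getLast h]
  rw [List.getLastD_eq_getLast?, List.getLast?_eq_some_getLast h]
  rfl

theorem pvBuildOffs (ls : List Int) (acc : List Int) (h : acc ≠ []) :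
    ls.foldl (fun o n => o ++ [o.getLastD 0 + n]) acc
      = acc.dropLast ++ pvScan (acc.getLastD 0) ls := by
  induction ls generalizing acc with
  | nil =>
    simp only [List.foldl_nil, pvScan]
    exact pvSplitLast acc h
  | cons n ns ih =>
    simp only [List.foldl_cons]
    rw [ih _ (by simp)]
    have h1 : (acc ++ [acc.getLastD 0 + n]).dropLast = acc := by simp
    have h2 : (acc ++ [acc.getLastD 0 + n]).getLastD 0 = acc.getLastD 0 + n := by
      simp [List.getLastD_eq_getLast?]
    rw [h1, h2]
    conv_lhs => rw [pvSplitLast acc h]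
    simp [pvScan]

theorem pvInnerA (a : List (List Int)) (prev : Int) (acc : List (Int × Int)) :
    a.foldl (fun (q : Int × List (Int × Int)) (p : List Int) =>
        (q.1 + (p.length : Int), q.2 ++ [(q.1, q.1 + (p.length : Int))])) (prev, acc)
      = (prev + (a.map (fun p => (p.length : Int))).sum,
         acc ++ pvPairs prev (a.map (fun p => (p.length : Int)))) := by
  induction a generalizing prev acc with
  | nil => simp [pvPairs]
  | cons p ps ih => simp [ih, pvPairs, add_assoc]

theorem pvMainA (arts : List (List (List Int))) (prev : Int)
    (d : PySem.Dict (Int × Int) (List (Int × Int))) :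
    (arts.foldl
      (fun (st : Int × PySem.Dict (Int × Int) (List (Int × Int))) (a : List (List Int)) =>
        let a_st := st.1
        let inner := a.foldl
          (fun (q : Int × List (Int × Int)) (p : List Int) =>
            (q.1 + (p.length : Int), q.2 ++ [(q.1, q.1 + (p.length : Int))]))
          (st.1, [])
        (inner.1, st.2.insert (a_st, inner.1) inner.2))
      (prev, d)).2 = pvSpecFold prev d arts := by
  induction arts generalizing prev d with
  | nil => simp [pvSpecFold]
  | cons a rest ih =>
    simp only [List.foldl_cons, pvSpecFold]
    rw [pvInnerA a prev []]
    simp [ih]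

theorem pvGetD_drop (l : List Int) (i k : Nat) :
    (l.drop i).getD k 0 = l.getD (i + k) 0 := by
  simp [List.getD, List.getElem?_drop]

theorem pvMainB (arts : List (List (List Int))) (offs : List Int) (i : Nat) (prev : Int)
    (d : PySem.Dict (Int × Int) (List (Int × Int)))
    (h : offs.drop i = pvScan prev (pvFlatLens arts)) :
    (arts.foldl
      (fun (st : Nat × PySem.Dict (Int × Int) (List (Int × Int))) (a : List (List Int)) =>
        let i := st.1
        let j := i + a.length
        let pairs := List.zip ((offs.drop i).take a.length) ((offs.drop (i + 1)).take a.length)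
        (j, st.2.insert (offs.getD i 0, offs.getD j 0) pairs))
      (i, d)).2 = pvSpecFold prev d arts := by
  induction arts generalizing i prev d with
  | nil => simp [pvSpecFold]
  | cons a rest ih =>
    have hflat : pvFlatLens (a :: rest)
        = a.map (fun p => (p.length : Int)) ++ pvFlatLens rest := by
      simp [pvFlatLens]
    have hlen : (a.map (fun p => (p.length : Int))).length = a.length := by simp
    have hS : offs.drop i
        = pvScan prev (a.map (fun p => (p.length : Int)) ++ pvFlatLens rest) := by
      rw [h, hflat]
    have hstart : offs.getD i 0 = prev := by
      rw [← Nat.add_zero i, ← pvGetD_drop, hS, pvScan_getD_zero]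
    have hend : offs.getD (i + a.length) 0
        = prev + (a.map (fun p => (p.length : Int))).sum := by
      rw [← pvGetD_drop, hS, ← hlen, pvScan_getD_append]
    have hdrop1 : offs.drop (i + 1)
        = (pvScan prev (a.map (fun p => (p.length : Int)) ++ pvFlatLens rest)).drop 1 := by
      rw [← hS, List.drop_drop]
    have hpairs : List.zip ((offs.drop i).take a.length) ((offs.drop (i + 1)).take a.length)
        = pvPairs prev (a.map (fun p => (p.length : Int))) := by
      rw [hS, hdrop1, ← hlen, pvZip_scan]
    have hnext : offs.drop (i + a.length)
        = pvScan (prev + (a.map (fun p => (p.length : Int))).sum) (pvFlatLens rest) := by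
      rw [← List.drop_drop, hS, ← hlen, pvScan_drop_append]
    simp only [List.foldl_cons, pvSpecFold]
    rw [hstart, hend, hpairs]
    exact ih (i + a.length) _ _ hnext

-- ===== VERDICT (by name: the statement is the Claim_ definition above) =====
theorem get_ranges_spec : Claim_equal_get_ranges := by
  intro artlist _
  show get_ranges artlist = get_ranges_alt artlist
  simp only [get_ranges, get_ranges_alt]
  have hoffs :
      (artlist.flatMap (fun a => a.map (fun p => (p.length : Int)))).foldl
          (fun o n => o ++ [o.getLastD 0 + n]) [0]
        = pvScan 0 (pvFlatLens artlist) := by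
    rw [pvBuildOffs _ [0] (by simp)]
    simp [pvFlatLens]
  rw [pvMainA artlist 0 PySem.Dict.empty,
      pvMainB artlist _ 0 0 PySem.Dict.empty (by simpa using hoffs)]
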